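-- pv_equiv track=rewrite | github.com/jbatterson/puzzles | tools/clueless/buildCandidatePool.py | build_alt_table
-- ===== SOURCE A (Python) =====
-- def build_alt_table(
--     curated: list[str], full_set: set[str]
-- ) -> dict[str, list[set[str]]]:
--     alt: dict[str, list[set[str]]] = {}
--     for w in curated:
--         positions: list[set[str]] = []
--         for p in range(5):
--             alts: set[str] = set()
--             prefix = w[:p]
--             suffix = w[p + 1 :]
--             for code in range(ord("a"), ord("z") + 1):
--                 ch = chr(code)
--                 if ch == w[p]:
--                     continue
--                 if prefix + ch + suffix in full_set:
--                     alts.add(ch)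
--             positions.append(alts)
--         alt[w] = positions
--     return alt
-- ===== SOURCE B (Python) =====
-- def build_alt_table(curated, full_set):
--     # Inverse index: for every word in full_set, file its letter at each of the
--     # first 5 positions under the deletion pattern (p, prefix, suffix).
--     index = {}
--     for fw in full_set:
--         for p in range(min(len(fw), 5)):
--             index.setdefault((p, fw[:p], fw[p + 1:]), set()).add(fw[p])
--     no_hits = set()
--     alt = {}
--     for w in curated:
--         positions = []
--         for p in range(5):
--             bucket = index.get((p, w[:p], w[p + 1:]), no_hits)
--             positions.append({ch for ch in "abcdefghijklmnopqrstuvwxyz"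
--                               if ch != w[p] and ch in bucket})
--         alt[w] = positions
--     return alt
-- ===== Notes on version B (the rewrite author's own statement) =====
-- stated objective: alternative
-- what changed: Replaces A's per-(word,position) probing of 25 candidate substitutions against full_set by a one-pass inverse deletion-pattern index over full_set keyed by (position, prefix, suffix), followed by constant-size bucket lookups per curated word.
import Mathlib
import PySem

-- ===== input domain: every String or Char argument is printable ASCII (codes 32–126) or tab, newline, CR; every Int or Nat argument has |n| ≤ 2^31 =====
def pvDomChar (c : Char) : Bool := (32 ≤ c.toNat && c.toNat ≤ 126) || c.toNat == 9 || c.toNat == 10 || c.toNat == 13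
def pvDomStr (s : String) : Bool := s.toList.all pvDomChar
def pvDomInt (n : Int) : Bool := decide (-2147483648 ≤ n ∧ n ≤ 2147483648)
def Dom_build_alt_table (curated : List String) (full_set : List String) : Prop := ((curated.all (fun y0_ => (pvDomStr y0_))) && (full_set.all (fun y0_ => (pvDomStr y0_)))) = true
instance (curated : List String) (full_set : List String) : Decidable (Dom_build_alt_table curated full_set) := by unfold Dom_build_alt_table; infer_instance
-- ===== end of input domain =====

-- B replaces A's 25-probe scan of full_set per (word, position) by a deletion-pattern index built
-- once over full_set and a constant-size bucket lookup per (word, position); return values agree.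

-- ===== PORT A =====
-- Strings are handled on the List Char side (PySem.Str.* are thin wrappers over PySem.Chars).
-- A's inner loop over one position p of word wc: probes chr(code) for code in range(97, 123).
-- w[p] is PySem.List.pyGet?; where Python raises IndexError (len(w) < 5, excluded by Pre_) the
-- comparison 'some ch = none' is simply false.
def pvAltsA (fs : List (List Char)) (wc : List Char) (p : Int) : PySem.Set String :=
  let pfx := PySem.List.slice wc none (some p)            -- w[:p]
  let sfx := PySem.List.slice wc (some (p + 1)) none      -- w[p+1:]
  (PySem.List.pyRange 97 123).foldl
    (fun (alts : PySem.Set String) code =>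
      let ch := Char.ofNat code.toNat                     -- chr(code)
      if some ch = PySem.List.pyGet? wc p then alts       -- continue
      else if fs.contains (pfx ++ [ch] ++ sfx) then       -- prefix + ch + suffix in full_set
        PySem.Set.add alts (String.mk [ch])
      else alts)
    PySem.Set.empty

def pvPositionsA (fs : List (List Char)) (wc : List Char) : List (List String) :=
  (PySem.List.pyRange 0 5).foldl (fun positions p => positions ++ [pvAltsA fs wc p]) []

def build_alt_table (curated : List String) (full_set : List String) : List (String × List (List String)) :=
  let fs := full_set.map String.toList
  (curated.foldl
    (fun (alt : PySem.Dict String (List (List String))) w => alt.insert w (pvPositionsA fs w.toList))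
    PySem.Dict.empty).items

-- ===== PORT B =====
-- First pass of Source B: for fw in full_set, for p in range(min(len(fw), 5)):
--   index.setdefault((p, fw[:p], fw[p+1:]), set()).add(fw[p])
-- (Dict.insert overwrites in place / appends new keys — exactly setdefault+add on the stored set).
def pvIndexWord (idx : PySem.Dict (Int × List Char × List Char) (PySem.Set Char)) (fw : List Char) :
    PySem.Dict (Int × List Char × List Char) (PySem.Set Char) :=
  (PySem.List.pyRange 0 (min (fw.length : Int) 5)).foldl
    (fun idx p =>
      match PySem.List.pyGet? fw p with
      | some c =>
          let key := (p, PySem.List.slice fw none (some p), PySem.List.slice fw (some (p + 1)) none)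
          idx.insert key (PySem.Set.add (idx.getD key PySem.Set.empty) c)
      | none => idx)   -- unreachable: p < len(fw) inside the range
    idx

def pvIndex (fs : List (List Char)) : PySem.Dict (Int × List Char × List Char) (PySem.Set Char) :=
  fs.foldl pvIndexWord PySem.Dict.empty

def pvLowers : List Char := "abcdefghijklmnopqrstuvwxyz".toList

-- Second pass of Source B for one position p of word wc:
--   {ch for ch in lowers if ch != w[p] and ch in index.get((p, w[:p], w[p+1:]), no_hits)}
def pvAltsB (index : PySem.Dict (Int × List Char × List Char) (PySem.Set Char)) (wc : List Char)
    (p : Int) : PySem.Set String :=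
  let bucket := index.getD (p, PySem.List.slice wc none (some p),
                            PySem.List.slice wc (some (p + 1)) none) PySem.Set.empty
  pvLowers.foldl
    (fun (s : PySem.Set String) ch =>
      if some ch ≠ PySem.List.pyGet? wc p ∧ PySem.Set.contains bucket ch then
        PySem.Set.add s (String.mk [ch])
      else s)
    PySem.Set.empty

def pvPositionsB (index : PySem.Dict (Int × List Char × List Char) (PySem.Set Char))
    (wc : List Char) : List (List String) :=
  (PySem.List.pyRange 0 5).foldl (fun positions p => positions ++ [pvAltsB index wc p]) []

def build_alt_table_alt (curated : List String) (full_set : List String) : List (String × List (List String)) :=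
  let fs := full_set.map String.toList
  let index := pvIndex fs
  (curated.foldl
    (fun (alt : PySem.Dict String (List (List String))) w => alt.insert w (pvPositionsB index w.toList))
    PySem.Dict.empty).items

-- ===== PRECONDITION & SPEC =====
-- Pre_ excludes exactly the inputs where the Python A raises IndexError: a curated word shorter
-- than 5 characters makes w[p] fail for some p in range(5) (B raises there too).
def Pre_build_alt_table (curated : List String) (full_set : List String) : Prop :=
  ∀ w ∈ curated, 5 ≤ w.toList.length
instance (curated : List String) (full_set : List String) : Decidable (Pre_build_alt_table curated full_set) := by unfold Pre_build_alt_table; infer_instance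

def pvWitness_build_alt_table : List String × List String := (["aback", "abase"], ["aback", "about", "cback"])

def Spec_build_alt_table (curated : List String) (full_set : List String) (out : List (String × List (List String))) : Prop := out = build_alt_table_alt curated full_set
instance (curated : List String) (full_set : List String) (out : List (String × List (List String))) : Decidable (Spec_build_alt_table curated full_set out) := by unfold Spec_build_alt_table; infer_instance

-- ===== CLAIM (what is proved, stated in full; the proofs are below) =====
def Claim_equal_build_alt_table : Prop := ∀ (curated : List String) (full_set : List String), Dom_build_alt_table curated full_set → Pre_build_alt_table curated full_set → Spec_build_alt_table curated full_set (build_alt_table curated full_set)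

-- ===== LEMMAS AND PROOFS =====

-- one index-building step at position q of word fw touches the bucket of key exactly when
-- key is fw's deletion pattern at q, and then files fw[q]
def pvHit (fw : List Char) (q : Int) (key : Int × List Char × List Char) (c : Char) : Prop :=
  key = (q, PySem.List.slice fw none (some q), PySem.List.slice fw (some (q + 1)) none) ∧
    PySem.List.pyGet? fw q = some c

theorem pv_mem_inner (fw : List Char) (key : Int × List Char × List Char) (c : Char) :
    ∀ (qs : List Int) (idx : PySem.Dict (Int × List Char × List Char) (PySem.Set Char)),
      c ∈ (qs.foldl
            (fun idx p =>
              match PySem.List.pyGet? fw p with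
              | some d =>
                  let k := (p, PySem.List.slice fw none (some p), PySem.List.slice fw (some (p + 1)) none)
                  idx.insert k (PySem.Set.add (idx.getD k PySem.Set.empty) d)
              | none => idx)
            idx).getD key PySem.Set.empty ↔
        c ∈ idx.getD key PySem.Set.empty ∨ ∃ q ∈ qs, pvHit fw q key c := by
  intro qs
  induction qs with
  | nil => simp [List.foldl]
  | cons q qs ih =>
    intro idx
    simp only [List.foldl]
    cases hq : PySem.List.pyGet? fw q with
    | none =>
      rw [ih]
      constructor
      · rintro (h | h)
        · exact Or.inl h
        · exact Or.inr ⟨h.choose, List.mem_cons_of_mem _ h.choose_spec.1, h.choose_spec.2⟩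
      · rintro (h | ⟨q', hq', hhit⟩)
        · exact Or.inl h
        · rcases List.mem_cons.mp hq' with rfl | hmem
          · exact absurd hhit.2 (by simp [hq])
          · exact Or.inr ⟨q', hmem, hhit⟩
    | some d =>
      rw [ih]
      rw [PySem.Dict.getD_insert]
      by_cases hk : key = (q, PySem.List.slice fw none (some q), PySem.List.slice fw (some (q + 1)) none)
      · subst hk
        simp only [eq_self_iff_true, if_true, PySem.Set.mem_add]
        constructor
        · rintro ((h | rfl) | h)
          · exact Or.inl h
          · exact Or.inr ⟨q, List.mem_cons_self .., ⟨rfl, hq⟩⟩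
          · exact Or.inr ⟨h.choose, List.mem_cons_of_mem _ h.choose_spec.1, h.choose_spec.2⟩
        · rintro (h | ⟨q', hq', hhit⟩)
          · exact Or.inl (Or.inl h)
          · rcases List.mem_cons.mp hq' with rfl | hmem
            · have : d = c := by have := hhit.2; rw [hq] at this; exact Option.some.inj this
              exact Or.inl (Or.inr this.symm)
            · exact Or.inr ⟨q', hmem, hhit⟩
      · simp only [if_neg hk]
        constructor
        · rintro (h | h)
          · exact Or.inl h
          · exact Or.inr ⟨h.choose, List.mem_cons_of_mem _ h.choose_spec.1, h.choose_spec.2⟩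
        · rintro (h | ⟨q', hq', hhit⟩)
          · exact Or.inl h
          · rcases List.mem_cons.mp hq' with rfl | hmem
            · exact absurd hhit.1 hk
            · exact Or.inr ⟨q', hmem, hhit⟩

theorem pv_mem_indexWord (fw : List Char) (key : Int × List Char × List Char) (c : Char)
    (idx : PySem.Dict (Int × List Char × List Char) (PySem.Set Char)) :
    c ∈ (pvIndexWord idx fw).getD key PySem.Set.empty ↔
      c ∈ idx.getD key PySem.Set.empty ∨
        ∃ q ∈ PySem.List.pyRange 0 (min (fw.length : Int) 5), pvHit fw q key c := by
  exact pv_mem_inner fw key c _ idx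

theorem pv_mem_index (fs : List (List Char)) (key : Int × List Char × List Char) (c : Char) :
    c ∈ (pvIndex fs).getD key PySem.Set.empty ↔
      ∃ fw ∈ fs, ∃ q ∈ PySem.List.pyRange 0 (min (fw.length : Int) 5), pvHit fw q key c := by
  have aux : ∀ (fws : List (List Char)) (idx : PySem.Dict (Int × List Char × List Char) (PySem.Set Char)),
      c ∈ (fws.foldl pvIndexWord idx).getD key PySem.Set.empty ↔
        c ∈ idx.getD key PySem.Set.empty ∨
          ∃ fw ∈ fws, ∃ q ∈ PySem.List.pyRange 0 (min (fw.length : Int) 5), pvHit fw q key c := by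
    intro fws
    induction fws with
    | nil => simp [List.foldl]
    | cons fw fws ih =>
      intro idx
      simp only [List.foldl]
      rw [ih, pv_mem_indexWord]
      constructor
      · rintro ((h | h) | ⟨fw', hfw', h⟩)
        · exact Or.inl h
        · exact Or.inr ⟨fw, List.mem_cons_self .., h⟩
        · exact Or.inr ⟨fw', List.mem_cons_of_mem _ hfw', h⟩
      · rintro (h | ⟨fw', hfw', h⟩)
        · exact Or.inl (Or.inl h)
        · rcases List.mem_cons.mp hfw' with rfl | hmem
          · exact Or.inl (Or.inr h)
          · exact Or.inr ⟨fw', hmem, h⟩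
  rw [pvIndex, aux fs PySem.Dict.empty]
  simp [PySem.Dict.getD_empty, PySem.Set.empty]

-- the bucket of w's deletion pattern at p holds c exactly when the substituted word is in full_set
theorem pv_mem_bucket (fs : List (List Char)) (wc : List Char) (pn : Nat)
    (hp5 : pn < 5) (hw : pn < wc.length) (c : Char) :
    c ∈ (pvIndex fs).getD ((pn : Int), wc.take pn, wc.drop (pn + 1)) PySem.Set.empty ↔
      (wc.take pn ++ c :: wc.drop (pn + 1)) ∈ fs := by
  rw [pv_mem_index]
  constructor
  · rintro ⟨fw, hfw, q, hq, hkey, hget⟩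
    rw [PySem.List.mem_pyRange_one] at hq
    rw [Prod.ext_iff, Prod.ext_iff] at hkey
    obtain ⟨h1, h2, h3⟩ := hkey
    dsimp only at h1 h2 h3
    obtain ⟨qn, rfl⟩ := Int.eq_ofNat_of_zero_le hq.1
    have hq1 : pn = qn := by exact_mod_cast h1
    subst hq1
    rw [PySem.List.slice_to_natCast] at h2
    have hcast : ((pn : Int) + 1) = ((pn + 1 : Nat) : Int) := by push_cast; ring
    rw [hcast, PySem.List.slice_from_natCast] at h3
    rw [PySem.List.pyGet?_natCast] at hget
    have hlt : pn < fw.length := by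
      rcases lt_or_ge pn fw.length with h | h
      · exact h
      · rw [List.getElem?_eq_none (by omega)] at hget; cases hget
    have hfwc : fw[pn] = c := by
      rw [List.getElem?_eq_getElem hlt] at hget; exact Option.some.inj hget
    have hdec : fw = fw.take pn ++ fw[pn] :: fw.drop (pn + 1) := by
      conv_lhs => rw [← List.take_append_drop pn fw, List.drop_eq_getElem_cons hlt]
    rw [hdec, hfwc, ← h2, ← h3] at hfw
    exact hfw
  · intro hc
    have hlen : (wc.take pn ++ c :: wc.drop (pn + 1)).length = wc.length := by
      simp [List.length_take, List.length_drop]; omega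
    refine ⟨wc.take pn ++ c :: wc.drop (pn + 1), hc, (pn : Int), ?_, ?_, ?_⟩
    · rw [PySem.List.mem_pyRange_one, hlen]
      omega
    · rw [Prod.ext_iff, Prod.ext_iff]
      refine ⟨rfl, ?_, ?_⟩
      · dsimp only
        rw [PySem.List.slice_to_natCast]
        rw [List.take_left' (by simp [List.length_take]; omega)]
      · dsimp only
        have hcast : ((pn : Int) + 1) = ((pn + 1 : Nat) : Int) := by push_cast; ring
        rw [hcast, PySem.List.slice_from_natCast]
        rw [List.append_cons, List.drop_left' (by simp [List.length_take]; omega)]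
    · rw [PySem.List.pyGet?_natCast]
      rw [List.getElem?_append_right (by simp [List.length_take])]
      have hm : (wc.take pn).length = pn := by simp [List.length_take]; omega
      rw [hm, Nat.sub_self]
      simp

theorem pv_alts_eq (fs : List (List Char)) (wc : List Char) (p : Int)
    (hp0 : 0 ≤ p) (hp5 : p < 5) (hw : p.toNat < wc.length) :
    pvAltsA fs wc p = pvAltsB (pvIndex fs) wc p := by
  obtain ⟨pn, rfl⟩ := Int.eq_ofNat_of_zero_le hp0
  have hpn5 : pn < 5 := by exact_mod_cast hp5
  have hpnw : pn < wc.length := by omega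
  have hcast : ((pn : Int) + 1) = ((pn + 1 : Nat) : Int) := by push_cast; ring
  unfold pvAltsA pvAltsB
  dsimp only
  rw [PySem.List.slice_to_natCast, hcast, PySem.List.slice_from_natCast]
  have hl : pvLowers = (PySem.List.pyRange 97 123).map (fun code : Int => Char.ofNat code.toNat) := by
    decide
  rw [hl, List.foldl_map]
  apply PySem.List.foldl_congr_mem
  intro acc code _hcode
  dsimp only
  have hcontains : fs.contains (wc.take pn ++ [Char.ofNat code.toNat] ++ wc.drop (pn + 1)) =
      PySem.Set.contains ((pvIndex fs).getD ((pn : Int), wc.take pn, wc.drop (pn + 1)) PySem.Set.empty)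
        (Char.ofNat code.toNat) := by
    rw [Bool.eq_iff_iff, List.contains_iff_mem, PySem.Set.contains_iff]
    simp only [List.append_assoc, List.singleton_append]
    exact (pv_mem_bucket fs wc pn hpn5 hpnw (Char.ofNat code.toNat)).symm
  by_cases heq : some (Char.ofNat code.toNat) = PySem.List.pyGet? wc (pn : Int)
  · simp [heq]
  · have heq' : ¬ some (Char.ofNat code.toNat) = wc[pn]? := by
      rwa [PySem.List.pyGet?_natCast] at heq
    simp only [if_neg heq]
    rw [← hcontains]
    simp [heq']

theorem pv_positions_eq (fs : List (List Char)) (wc : List Char) (hw : 5 ≤ wc.length) :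
    pvPositionsA fs wc = pvPositionsB (pvIndex fs) wc := by
  have h05 : PySem.List.pyRange 0 5 = [0, 1, 2, 3, 4] := by decide
  unfold pvPositionsA pvPositionsB
  rw [h05]
  simp only [List.foldl]
  rw [pv_alts_eq fs wc 0 (by omega) (by omega) (by omega),
      pv_alts_eq fs wc 1 (by omega) (by omega) (by omega),
      pv_alts_eq fs wc 2 (by omega) (by omega) (by omega),
      pv_alts_eq fs wc 3 (by omega) (by omega) (by omega),
      pv_alts_eq fs wc 4 (by omega) (by omega) (by omega)]

-- ===== VERDICT (by name: the statement is the Claim_ definition above) =====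
theorem build_alt_table_spec : Claim_equal_build_alt_table := by
  intro curated full_set _hdom hpre
  unfold Spec_build_alt_table build_alt_table build_alt_table_alt
  dsimp only
  congr 1
  apply PySem.List.foldl_congr_mem
  intro acc w hw
  rw [pv_positions_eq _ _ (by simpa using hpre w hw)]
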